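-- pv_equiv track=rewrite | github.com/sucharitha2308/Gen-Ai-Project | train_model.py | parse_raw_message
-- ===== SOURCE A (Python) =====
-- def parse_raw_message(raw_message):
--     """Extracts the body from the raw email message."""
--     lines = raw_message.split('\n')
--     body = []
--     reading_body = False
--     for line in lines:
--         if reading_body:
--             body.append(line)
--         elif line.strip() == "":
--             reading_body = True
--     return "\n".join(body).strip()
-- ===== SOURCE B (Python) =====
-- def parse_raw_message(raw_message):
--     """Extracts the body from the raw email message.
--
--     Character-level scan: no split/join. Walk the string once tracking whether
--     the current line has only whitespace; at the newline that ends the first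
--     blank line, the body is simply the rest of the string, stripped.
--     """
--     blank = True
--     for pos, ch in enumerate(raw_message):
--         if ch == '\n':
--             if blank:
--                 return raw_message[pos + 1:].strip()
--             blank = True
--         elif not ch.isspace():
--             blank = False
--     return ""
-- ===== Notes on version B (the rewrite author's own statement) =====
-- stated objective: alternative
-- what changed: Replaces A's split-into-lines loop with a stateful flag by a single character-level scan that never splits or joins: it tracks whether the current line is all-whitespace and, at the newline closing the first blank line, returns the remaining suffix of the string stripped.
import Mathlib
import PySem

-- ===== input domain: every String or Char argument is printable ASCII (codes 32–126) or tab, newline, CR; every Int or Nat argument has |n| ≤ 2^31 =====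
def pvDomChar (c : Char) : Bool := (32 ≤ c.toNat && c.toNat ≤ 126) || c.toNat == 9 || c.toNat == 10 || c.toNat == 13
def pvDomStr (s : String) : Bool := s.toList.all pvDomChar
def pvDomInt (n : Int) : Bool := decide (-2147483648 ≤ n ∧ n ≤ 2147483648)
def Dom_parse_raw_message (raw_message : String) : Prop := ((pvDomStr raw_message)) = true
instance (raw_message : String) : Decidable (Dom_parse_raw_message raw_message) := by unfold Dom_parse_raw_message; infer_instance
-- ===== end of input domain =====

-- B replaces A's split-into-lines flag loop by a single character-level scan
-- (no split/join at all): at the newline ending the first whitespace-only line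
-- the body is the remaining suffix of the string, stripped (simpler).

-- ===== PORT A =====
-- the loop body: state = (body, reading_body); lines as char lists (Str.* are thin wrappers over Chars.*)
def pvStepA (st : List (List Char) × Bool) (line : List Char) : List (List Char) × Bool :=
  if st.2 then (st.1 ++ [line], st.2)
  else if PySem.Chars.strip line = [] then (st.1, true)
  else st

def parse_raw_message (raw_message : String) : String :=
  -- sep "\n" is non-empty, so split? is always `some` (Python raises only for empty sep)
  let lines := (PySem.Chars.split? raw_message.toList ['\n']).getD []
  let st := lines.foldl pvStepA ([], false)
  String.ofList (PySem.Chars.strip (PySem.Chars.join ['\n'] st.1))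

-- ===== PORT B =====
-- blank = "current line is all whitespace so far"; at the '\n' closing a blank
-- line the body is the remaining tail (= raw_message[pos+1:]), stripped
def pvScanB : Bool → List Char → List Char
  | _, [] => []
  | blank, c :: rest =>
      if c = '\n' then
        if blank then PySem.Chars.strip rest else pvScanB true rest
      else pvScanB (blank && PySem.Chars.isspace c) rest

def parse_raw_message_alt (raw_message : String) : String :=
  String.ofList (pvScanB true raw_message.toList)

-- ===== PRECONDITION & SPEC =====
def Spec_parse_raw_message (raw_message : String) (out : String) : Prop := out = parse_raw_message_alt raw_message
instance (raw_message : String) (out : String) : Decidable (Spec_parse_raw_message raw_message out) := by unfold Spec_parse_raw_message; infer_instance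

-- ===== CLAIM (what is proved, stated in full; the proofs are below) =====
def Claim_equal_parse_raw_message : Prop := ∀ (raw_message : String), Dom_parse_raw_message raw_message → Spec_parse_raw_message raw_message (parse_raw_message raw_message)

-- ===== LEMMAS AND PROOFS =====

-- structural recursion equivalent of PySem.Chars.splitOn on the one-char sep ['\n']
def pvSplit (pre : List Char) : List Char → List (List Char)
  | [] => [pre]
  | c :: rest => if c = '\n' then pre :: pvSplit [] rest else pvSplit (pre ++ [c]) rest

theorem pvGo_eq (fuel : Nat) (l cur : List Char) (acc : List (List Char))
    (h : l.length < fuel) :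
    PySem.Chars.splitOn.go ['\n'] fuel l cur acc = acc.reverse ++ pvSplit cur.reverse l := by
  induction fuel generalizing l cur acc with
  | zero => omega
  | succ f ih =>
    cases l with
    | nil => simp [PySem.Chars.splitOn.go, pvSplit]
    | cons c rest =>
      by_cases hc : c = '\n'
      · subst hc
        have hp : List.isPrefixOf ['\n'] ('\n' :: rest) = true := by
          simp [List.isPrefixOf]
        simp only [PySem.Chars.splitOn.go, hp, if_true]
        rw [ih _ _ _ (by simpa using Nat.lt_of_succ_lt_succ h)]
        simp [pvSplit]
      · have hp : List.isPrefixOf ['\n'] (c :: rest) = false := by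
          simp [List.isPrefixOf, Ne.symm hc]
        simp only [PySem.Chars.splitOn.go, hp, Bool.false_eq_true, if_false]
        rw [ih _ _ _ (by simpa using Nat.lt_of_succ_lt_succ h)]
        simp [pvSplit, hc]

theorem pvSplitOn_eq (cs : List Char) :
    PySem.Chars.splitOn cs ['\n'] = pvSplit [] cs := by
  have := pvGo_eq (cs.length + 1) cs [] [] (by omega)
  simpa [PySem.Chars.splitOn] using this

theorem pvSplit_ne_nil (cs : List Char) (pre : List Char) : pvSplit pre cs ≠ [] := by
  induction cs generalizing pre with
  | nil => simp [pvSplit]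
  | cons c rest ih =>
    by_cases hc : c = '\n'
    · simp [pvSplit, hc]
    · simpa [pvSplit, hc] using ih (pre ++ [c])

theorem pvJoin_pvSplit (cs : List Char) (pre : List Char) :
    PySem.Chars.join ['\n'] (pvSplit pre cs) = pre ++ cs := by
  induction cs generalizing pre with
  | nil => simp [pvSplit, PySem.Chars.join_singleton]
  | cons c rest ih =>
    by_cases hc : c = '\n'
    · subst hc
      obtain ⟨q, ps, hq⟩ := List.exists_cons_of_ne_nil (pvSplit_ne_nil rest [])
      have hjoin := ih ([] : List Char)
      rw [hq] at hjoin
      rw [show pvSplit pre ('\n' :: rest) = pre :: q :: ps from by simp [pvSplit, hq]]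
      rw [PySem.Chars.join_cons_cons, hjoin]
      simp
    · simp only [pvSplit, hc, if_false]
      rw [ih (pre ++ [c])]
      simp

theorem pvStrip_eq_nil_iff (l : List Char) :
    PySem.Chars.strip l = [] ↔ l.all PySem.Chars.isspace := by
  constructor
  · intro h
    unfold PySem.Chars.strip PySem.Chars.rstrip PySem.Chars.lstrip at h
    have h1 : List.dropWhile PySem.Chars.isspace (List.dropWhile PySem.Chars.isspace l).reverse = [] := by
      simpa using congrArg List.reverse h
    rw [List.dropWhile_eq_nil_iff] at h1
    have h2 : List.dropWhile PySem.Chars.isspace l = [] := by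
      cases hd : List.dropWhile PySem.Chars.isspace l with
      | nil => rfl
      | cons x xs =>
        have hx : ¬ PySem.Chars.isspace x = true := by
          have := List.head?_dropWhile_not PySem.Chars.isspace l
          rw [hd] at this; simpa using this
        exact absurd (h1 x (by simp [hd])) hx
    rw [List.dropWhile_eq_nil_iff] at h2
    simpa [List.all_eq_true] using h2
  · intro h
    have h2 : List.dropWhile PySem.Chars.isspace l = [] := by
      rw [List.dropWhile_eq_nil_iff]
      intro x hx; exact List.all_eq_true.mp h x hx
    simp [PySem.Chars.strip, PySem.Chars.lstrip, PySem.Chars.rstrip, h2]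

theorem pvFoldA_true (ls : List (List Char)) (b : List (List Char)) :
    ls.foldl pvStepA (b, true) = (b ++ ls, true) := by
  induction ls generalizing b with
  | nil => simp
  | cons l t ih => simp [pvStepA, ih]

theorem pvScan_main (cs : List Char) (pre : List Char) :
    pvScanB (pre.all PySem.Chars.isspace) cs =
      PySem.Chars.strip (PySem.Chars.join ['\n'] ((pvSplit pre cs).foldl pvStepA ([], false)).1) := by
  induction cs generalizing pre with
  | nil =>
    by_cases hs : PySem.Chars.strip pre = []
    · have hstep : pvStepA ([], false) pre = ([], true) := by simp [pvStepA, hs]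
      simp [pvScanB, pvSplit, hstep, PySem.Chars.join_nil, PySem.Chars.strip,
        PySem.Chars.lstrip, PySem.Chars.rstrip]
    · have hstep : pvStepA ([], false) pre = ([], false) := by simp [pvStepA, hs]
      simp [pvScanB, pvSplit, hstep, PySem.Chars.join_nil, PySem.Chars.strip,
        PySem.Chars.lstrip, PySem.Chars.rstrip]
  | cons c rest ih =>
    by_cases hc : c = '\n'
    · subst hc
      by_cases hb : pre.all PySem.Chars.isspace
      · have hs : PySem.Chars.strip pre = [] := (pvStrip_eq_nil_iff pre).mpr hb
        have hstep : pvStepA ([], false) pre = ([], true) := by simp [pvStepA, hs]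
        rw [show pvSplit pre ('\n' :: rest) = pre :: pvSplit [] rest from by simp [pvSplit]]
        rw [List.foldl_cons, hstep, pvFoldA_true]
        simp only [pvScanB, hb, if_true, List.nil_append]
        rw [pvJoin_pvSplit]
        simp
      · have hs : ¬ PySem.Chars.strip pre = [] := fun hh => hb ((pvStrip_eq_nil_iff pre).mp hh)
        have hstep : pvStepA ([], false) pre = ([], false) := by simp [pvStepA, hs]
        have hb' : pre.all PySem.Chars.isspace = false := Bool.eq_false_iff.mpr hb
        rw [show pvSplit pre ('\n' :: rest) = pre :: pvSplit [] rest from by simp [pvSplit]]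
        rw [List.foldl_cons, hstep]
        simp only [pvScanB, hb', Bool.false_eq_true, if_false]
        simpa using ih ([] : List Char)
    · simp only [pvScanB, hc, if_false, pvSplit]
      simpa [List.all_append, Bool.and_comm] using ih (pre ++ [c])

-- ===== VERDICT (by name: the statement is the Claim_ definition above) =====
theorem parse_raw_message_spec : Claim_equal_parse_raw_message := by
  intro raw_message _
  unfold Spec_parse_raw_message parse_raw_message parse_raw_message_alt
  have hsplit : (PySem.Chars.split? raw_message.toList ['\n']).getD [] = pvSplit [] raw_message.toList := by
    simp [PySem.Chars.split?, pvSplitOn_eq]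
  rw [hsplit]
  have hmain := pvScan_main raw_message.toList []
  simp only [List.all_nil] at hmain
  rw [hmain]
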